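-- pv_equiv track=rewrite | github.com/hila8123/intelligence_interactive_systems_final_project | algorithm1.py | new_b
-- ===== SOURCE A (Python) =====
-- def new_b(row , max_):
--
--     scores = {}
--     for i in range(1, max_+1):
--         temp = []
--         for j in range(len(row)):
--             if row[j] == str(i):
--                 #temp.append(scores[i])
--                 temp.append(j+1)
--                 scores[i] = temp
--
--     return scores
-- ===== SOURCE B (Python) =====
-- def new_b(row, max_):
--     # One pass bucketing positions by the cell's string value, then one lookup per i;
--     # O(len(row) + max_) instead of A's O(len(row) * max_).
--     pos = {}
--     for j, s in enumerate(row):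
--         pos.setdefault(s, []).append(j + 1)
--     out = {}
--     for i in range(1, max_ + 1):
--         s = str(i)
--         if s in pos:
--             out[i] = pos[s]
--     return out
-- ===== Notes on version B (the rewrite author's own statement) =====
-- stated objective: faster
-- what changed: Instead of rescanning the whole row for every candidate value i in 1..max_, B makes one pass over the row bucketing 1-based positions into a dict keyed by the cell's string, then does a single dict lookup per i.
import Mathlib
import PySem

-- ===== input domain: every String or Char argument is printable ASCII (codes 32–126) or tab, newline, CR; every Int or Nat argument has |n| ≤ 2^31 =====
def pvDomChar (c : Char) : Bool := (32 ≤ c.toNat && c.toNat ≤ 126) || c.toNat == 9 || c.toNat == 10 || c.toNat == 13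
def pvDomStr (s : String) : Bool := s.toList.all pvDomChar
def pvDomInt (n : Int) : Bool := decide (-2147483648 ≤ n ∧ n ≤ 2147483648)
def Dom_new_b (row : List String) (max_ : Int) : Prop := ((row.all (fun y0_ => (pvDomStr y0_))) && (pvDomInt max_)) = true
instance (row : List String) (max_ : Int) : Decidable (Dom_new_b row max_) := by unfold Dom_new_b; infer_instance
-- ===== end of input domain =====

-- B buckets the positions by the cell's string value in ONE pass over the row and then does one
-- dict lookup per candidate value, replacing A's rescan of the whole row for every i in 1..max_.

-- ===== PORT A =====
-- literal port: outer loop over range(1, max_+1); inner loop over range(len(row)) carrying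
-- (temp, scores); row[j] is in range for every j the loop produces, so pyGetD is exact here.
def new_b (row : List String) (max_ : Int) : List (Int × List Int) :=
  ((PySem.List.pyRange 1 (max_ + 1) 1).foldl
    (fun (scores : PySem.Dict Int (List Int)) i =>
      ((PySem.List.pyRange 0 (PySem.List.len row) 1).foldl
        (fun (st : List Int × PySem.Dict Int (List Int)) j =>
          if PySem.List.pyGetD row j "" == PySem.Int.toStr i then
            (st.1 ++ [j + 1], st.2.insert i (st.1 ++ [j + 1]))
          else st)
        ([], scores)).2)
    PySem.Dict.empty).items

-- ===== PORT B =====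
-- literal port of Source B: pos.setdefault(s, []).append(j+1) is an in-place overwrite at key s with
-- the old bucket (default []) extended by j+1, which is exactly Dict.insert of getD ++ [j+1].
def new_b_alt (row : List String) (max_ : Int) : List (Int × List Int) :=
  let pos : PySem.Dict String (List Int) :=
    (PySem.List.enumerate row).foldl
      (fun d p => d.insert p.2 (d.getD p.2 [] ++ [p.1 + 1]))
      PySem.Dict.empty
  ((PySem.List.pyRange 1 (max_ + 1) 1).foldl
    (fun (out : PySem.Dict Int (List Int)) i =>
      if pos.contains (PySem.Int.toStr i) then
        out.insert i (pos.getD (PySem.Int.toStr i) [])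
      else out)
    PySem.Dict.empty).items

-- ===== PRECONDITION & SPEC =====
def Spec_new_b (row : List String) (max_ : Int) (out : List (Int × List Int)) : Prop := out = new_b_alt row max_
instance (row : List String) (max_ : Int) (out : List (Int × List Int)) : Decidable (Spec_new_b row max_ out) := by unfold Spec_new_b; infer_instance

-- ===== CLAIM (what is proved, stated in full; the proofs are below) =====
def Claim_equal_new_b : Prop := ∀ (row : List String) (max_ : Int), Dom_new_b row max_ → Spec_new_b row max_ (new_b row max_)

-- ===== LEMMAS AND PROOFS =====

-- positions (1-based) at which the value s occurs in an enumerated row fragment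
def pvOcc (l : List (Int × String)) (s : String) : List Int :=
  (l.filter (fun p => p.2 == s)).map (fun p => p.1 + 1)

theorem pvOcc_nil (s : String) : pvOcc [] s = [] := rfl

theorem pvOcc_cons (p : Int × String) (l : List (Int × String)) (s : String) :
    pvOcc (p :: l) s = if p.2 == s then (p.1 + 1) :: pvOcc l s else pvOcc l s := by
  simp only [pvOcc, List.filter_cons]
  split <;> simp

-- A's inner loop over an enumerated list: appends the occurrence positions to temp and,
-- when there is at least one, stores the final temp under key i.
theorem pvInnerA (l : List (Int × String)) (i : Int) (t : List Int)
    (sc : PySem.Dict Int (List Int)) :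
    l.foldl (fun (st : List Int × PySem.Dict Int (List Int)) p =>
        if p.2 == PySem.Int.toStr i then
          (st.1 ++ [p.1 + 1], st.2.insert i (st.1 ++ [p.1 + 1]))
        else st) (t, sc)
      = (t ++ pvOcc l (PySem.Int.toStr i),
         if pvOcc l (PySem.Int.toStr i) = [] then sc
         else sc.insert i (t ++ pvOcc l (PySem.Int.toStr i))) := by
  induction l generalizing t sc with
  | nil => simp [pvOcc_nil]
  | cons p l ih =>
    rw [List.foldl_cons, pvOcc_cons]
    by_cases h : p.2 == PySem.Int.toStr i
    · simp only [h, if_true, ih]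
      by_cases h0 : pvOcc l (PySem.Int.toStr i) = []
      · simp [h0]
      · simp [h0, PySem.Dict.insert_insert_self]
    · simp only [h, ih]
      simp at h
      simp

-- B's bucket dict, lookups after the building loop
def pvStepPos (d : PySem.Dict String (List Int)) (p : Int × String) : PySem.Dict String (List Int) :=
  d.insert p.2 (d.getD p.2 [] ++ [p.1 + 1])

theorem pvPos_getD (l : List (Int × String)) (d : PySem.Dict String (List Int)) (s : String) :
    (l.foldl pvStepPos d).getD s [] = d.getD s [] ++ pvOcc l s := by
  induction l generalizing d with
  | nil => simp [pvOcc_nil]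
  | cons p l ih =>
    rw [List.foldl_cons, ih, pvOcc_cons, pvStepPos, PySem.Dict.getD_insert]
    by_cases h : s = p.2
    · simp [h]
    · have : ¬ (p.2 == s) = true := by simp [Ne.symm h]
      simp [h, this]

theorem pvPos_contains (l : List (Int × String)) (d : PySem.Dict String (List Int)) (s : String) :
    (l.foldl pvStepPos d).contains s = (d.contains s || l.any (fun p => p.2 == s)) := by
  induction l generalizing d with
  | nil => simp
  | cons p l ih =>
    rw [List.foldl_cons, ih, pvStepPos, PySem.Dict.contains_insert, List.any_cons]
    have hcomm : (s == p.2) = (p.2 == s) := by simp [BEq.comm]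
    rw [hcomm]
    cases (p.2 == s) <;> cases d.contains s <;> simp

theorem pvOcc_eq_nil_iff (l : List (Int × String)) (s : String) :
    pvOcc l s = [] ↔ l.any (fun p => p.2 == s) = false := by
  simp [pvOcc, List.filter_eq_nil_iff, List.any_eq_false]

-- ===== VERDICT (by name: the statement is the Claim_ definition above) =====
theorem new_b_spec : Claim_equal_new_b := by
  intro row max_ _
  unfold Spec_new_b new_b new_b_alt
  apply congrArg PySem.Dict.items
  apply PySem.List.foldl_congr_mem
  intro sc i _
  -- A's body at i
  have hconv : (PySem.List.pyRange 0 (PySem.List.len row) 1).foldl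
      (fun (st : List Int × PySem.Dict Int (List Int)) j =>
        if PySem.List.pyGetD row j "" == PySem.Int.toStr i then
          (st.1 ++ [j + 1], st.2.insert i (st.1 ++ [j + 1]))
        else st) ([], sc)
      = (PySem.List.enumerate row).foldl
        (fun (st : List Int × PySem.Dict Int (List Int)) p =>
          if p.2 == PySem.Int.toStr i then
            (st.1 ++ [p.1 + 1], st.2.insert i (st.1 ++ [p.1 + 1]))
          else st) ([], sc) := by
    rw [PySem.List.enumerate_eq_map_pyRange row "", List.foldl_map]
  rw [hconv, pvInnerA]
  -- B's body at i
  rw [show (fun d (p : Int × String) =>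
      PySem.Dict.insert d p.2 (d.getD p.2 [] ++ [p.1 + 1])) = pvStepPos from rfl]
  rw [pvPos_contains, pvPos_getD, PySem.Dict.getD_empty, PySem.Dict.contains_empty]
  by_cases h0 : pvOcc (PySem.List.enumerate row) (PySem.Int.toStr i) = []
  · have := (pvOcc_eq_nil_iff (PySem.List.enumerate row) (PySem.Int.toStr i)).1 h0
    simp [h0, this]
  · have := (pvOcc_eq_nil_iff (PySem.List.enumerate row) (PySem.Int.toStr i))
    have hany : (PySem.List.enumerate row).any (fun p => p.2 == PySem.Int.toStr i) = true := by
      rcases Bool.eq_false_or_eq_true ((PySem.List.enumerate row).any (fun p => p.2 == PySem.Int.toStr i)) with hf | ht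
      · exact hf
      · exact absurd (this.2 ht) h0
    simp [h0, hany]
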